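-- pv_equiv track=rewrite | github.com/Vinicius007700/Hackathon-Nasa | backend/calculo_evento.py | get_full_event_chain_ids
-- ===== SOURCE A (Python) =====
-- from collections import deque, Counter
--
-- def get_full_event_chain_ids(start_id, master_cache):
--     if start_id not in master_cache: return []
--     chain, queue = set(), deque([start_id])
--     while queue:
--         current_id = queue.popleft()
--         if current_id in chain: continue
--         chain.add(current_id)
--         for linked_event in master_cache.get(current_id, {}).get('linkedEvents') or []:
--             if linked_id := linked_event.get('activityID'): queue.append(linked_id)
--     return sorted(list(chain))
-- ===== SOURCE B (Python) =====
-- def get_full_event_chain_ids(start_id, master_cache):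
--     if start_id not in master_cache:
--         return []
--     # Fixed-point saturation: repeatedly sweep the whole current set, adding the
--     # truthy linked ids of every member, until a full sweep adds nothing.
--     chain = {start_id}
--     changed = True
--     while changed:
--         changed = False
--         for cid in list(chain):
--             for linked_event in master_cache.get(cid, {}).get('linkedEvents') or []:
--                 lid = linked_event.get('activityID')
--                 if lid and lid not in chain:
--                     chain.add(lid)
--                     changed = True
--     return sorted(chain)
-- ===== Notes on version B (the rewrite author's own statement) =====
-- stated objective: alternative
-- what changed: Replaces the BFS worklist (deque + pop/visited-check loop) with round-based fixed-point saturation: no queue or stack at all, B repeatedly sweeps the entire current id set, adding every truthy linked id of every member, and stops when a full sweep adds nothing; the result is the same reachable set, returned sorted.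
import Mathlib
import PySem

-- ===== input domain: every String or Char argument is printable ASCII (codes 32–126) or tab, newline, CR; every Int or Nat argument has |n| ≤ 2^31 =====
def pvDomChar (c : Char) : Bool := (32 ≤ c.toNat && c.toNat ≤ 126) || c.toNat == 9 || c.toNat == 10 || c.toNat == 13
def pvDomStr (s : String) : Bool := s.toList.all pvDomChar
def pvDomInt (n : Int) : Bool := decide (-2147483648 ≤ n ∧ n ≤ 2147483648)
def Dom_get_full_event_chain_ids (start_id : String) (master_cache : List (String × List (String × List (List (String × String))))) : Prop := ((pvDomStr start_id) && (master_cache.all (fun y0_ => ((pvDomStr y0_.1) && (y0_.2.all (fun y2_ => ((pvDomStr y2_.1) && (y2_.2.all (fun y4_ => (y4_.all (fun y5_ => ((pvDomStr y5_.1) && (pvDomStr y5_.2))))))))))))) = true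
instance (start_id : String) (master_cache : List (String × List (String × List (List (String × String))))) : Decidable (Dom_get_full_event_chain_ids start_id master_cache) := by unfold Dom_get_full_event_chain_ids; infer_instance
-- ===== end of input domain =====

-- B replaces A's BFS worklist by queue-free fixed-point saturation (repeated full sweeps of the
-- current set until a sweep adds nothing); same returned value (objective: alternative).

-- shared primitive: the expression `master_cache.get(id, {}).get('linkedEvents') or []`,
-- which appears verbatim in both Pythons
def pvLinksRaw (master_cache : List (String × List (String × List (List (String × String))))) (id : String) : List (List (String × String)) :=
  ((PySem.Dict.mk (((PySem.Dict.mk master_cache).get? id).getD [])).get? "linkedEvents").getD []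

-- truthy activityID of one linked-event dict (proof-side helper)
def pvExtractId (le : List (String × String)) : Option String :=
  match (PySem.Dict.mk le).get? "activityID" with
  | some lid => if lid = "" then none else some lid
  | none => none

def pvLinkIds (master_cache : List (String × List (String × List (List (String × String))))) (id : String) : List String :=
  (pvLinksRaw master_cache id).filterMap pvExtractId

def pvAllLinks (master_cache : List (String × List (String × List (List (String × String))))) : List String :=
  (master_cache.map Prod.fst).flatMap (fun k => pvLinkIds master_cache k)

def pvU (start_id : String) (master_cache : List (String × List (String × List (List (String × String))))) : List String :=
  start_id :: (master_cache.map Prod.fst ++ pvAllLinks master_cache)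

-- fuel bookkeeping (totality guards only; both loops terminate in Python)
def pvFuel (start_id : String) (master_cache : List (String × List (String × List (List (String × String))))) : Nat :=
  ((pvAllLinks master_cache).length + 1) * (pvU start_id master_cache).length + 2

def pvFuelB (start_id : String) (master_cache : List (String × List (String × List (List (String × String))))) : Nat :=
  (pvU start_id master_cache).length + 1

-- ===== PORT A =====
-- A's while loop: pop LEFT of the queue, skip if already in chain, else add and append links
def pvBfsA (master_cache : List (String × List (String × List (List (String × String))))) : Nat → List String → List String → List String
  | 0, _, chain => chain
  | _ + 1, [], chain => chain
  | f + 1, current :: rest, chain =>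
    if chain.contains current then pvBfsA master_cache f rest chain
    else
      pvBfsA master_cache f
        ((pvLinksRaw master_cache current).foldl (fun q le =>
          match (PySem.Dict.mk le).get? "activityID" with
          | some lid => if lid = "" then q else q ++ [lid]
          | none => q) rest)
        (PySem.Set.add chain current)

def get_full_event_chain_ids (start_id : String) (master_cache : List (String × List (String × List (List (String × String))))) : List String :=
  if (PySem.Dict.mk master_cache).contains start_id = false then []
  else PySem.List.sorted (pvBfsA master_cache (pvFuel start_id master_cache) [start_id] []) (fun x => x) false

-- ===== PORT B =====
-- B's inner body: `if lid and lid not in chain: chain.add(lid); changed = True`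
def pvInnerB (p : List String × Bool) (le : List (String × String)) : List String × Bool :=
  match (PySem.Dict.mk le).get? "activityID" with
  | some lid => if lid = "" ∨ lid ∈ p.1 then p else (p.1 ++ [lid], true)
  | none => p

-- B's `for cid in list(chain): for linked_event in …` sweep over the pass-start snapshot
def pvPassB (master_cache : List (String × List (String × List (List (String × String))))) (snapshot : List String) (p : List String × Bool) : List String × Bool :=
  snapshot.foldl (fun p cid => (pvLinksRaw master_cache cid).foldl pvInnerB p) p

-- B's `while changed:` loop, saturating to a fixed point
def pvSatB (master_cache : List (String × List (String × List (List (String × String))))) : Nat → List String → List String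
  | 0, chain => chain
  | f + 1, chain =>
    let p := pvPassB master_cache chain (chain, false)
    if p.2 then pvSatB master_cache f p.1 else p.1

def get_full_event_chain_ids_alt (start_id : String) (master_cache : List (String × List (String × List (List (String × String))))) : List String :=
  if (PySem.Dict.mk master_cache).contains start_id = false then []
  else PySem.List.sorted (pvSatB master_cache (pvFuelB start_id master_cache) [start_id]) (fun x => x) false

-- ===== PRECONDITION & SPEC =====
def Spec_get_full_event_chain_ids (start_id : String) (master_cache : List (String × List (String × List (List (String × String))))) (out : List String) : Prop := out = get_full_event_chain_ids_alt start_id master_cache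
instance (start_id : String) (master_cache : List (String × List (String × List (List (String × String))))) (out : List String) : Decidable (Spec_get_full_event_chain_ids start_id master_cache out) := by unfold Spec_get_full_event_chain_ids; infer_instance

-- ===== CLAIM (what is proved, stated in full; the proofs are below) =====
def Claim_equal_get_full_event_chain_ids : Prop := ∀ (start_id : String) (master_cache : List (String × List (String × List (List (String × String))))), Dom_get_full_event_chain_ids start_id master_cache → Spec_get_full_event_chain_ids start_id master_cache (get_full_event_chain_ids start_id master_cache)

-- ===== LEMMAS AND PROOFS =====

-- reachability along truthy linked-event ids
def pvReach (master_cache : List (String × List (String × List (List (String × String))))) : String → String → Prop :=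
  Relation.ReflTransGen (fun a b => b ∈ pvLinkIds master_cache a)

theorem pvLinkIds_def (master_cache : List (String × List (String × List (List (String × String)))))
    (id : String) : (pvLinksRaw master_cache id).filterMap pvExtractId = pvLinkIds master_cache id := rfl

-- A's inner for-loop just appends the truthy link ids to the queue
theorem pvFoldA_eq (master_cache : List (String × List (String × List (List (String × String)))))
    (les : List (List (String × String))) : ∀ (q : List String),
    les.foldl (fun q le =>
      match (PySem.Dict.mk le).get? "activityID" with
      | some lid => if lid = "" then q else q ++ [lid]
      | none => q) q
    = q ++ les.filterMap pvExtractId := by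
  induction les with
  | nil => intro q; simp
  | cons le t ih =>
    intro q
    simp only [List.foldl_cons, List.filterMap_cons]
    cases h : (PySem.Dict.mk le).get? "activityID" with
    | none =>
      have he : pvExtractId le = none := by simp [pvExtractId, h]
      simp [h, he, ih]
    | some lid =>
      by_cases hl : lid = ""
      · have he : pvExtractId le = none := by simp [pvExtractId, h, hl]
        simp [h, hl, he, ih]
      · have he : pvExtractId le = some lid := by simp [pvExtractId, h, hl]
        simp [h, hl, he, ih]

-- the fresh ids one inner sweep adds: first occurrences not yet in the chain, in order
def pvNewIds (c : List String) : List String → List String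
  | [] => []
  | x :: t => if x ∈ c then pvNewIds c t else x :: pvNewIds (c ++ [x]) t

theorem pvFoldInnerB_eq (les : List (List (String × String))) : ∀ (acc : List String) (b : Bool),
    les.foldl pvInnerB (acc, b)
    = (acc ++ pvNewIds acc (les.filterMap pvExtractId),
       b || !(pvNewIds acc (les.filterMap pvExtractId)).isEmpty) := by
  induction les with
  | nil => intro acc b; simp [pvNewIds]
  | cons le t ih =>
    intro acc b
    simp only [List.foldl_cons, List.filterMap_cons]
    cases h : (PySem.Dict.mk le).get? "activityID" with
    | none =>
      have he : pvExtractId le = none := by simp [pvExtractId, h]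
      simpa [pvInnerB, h, he] using ih acc b
    | some lid =>
      by_cases hl : lid = ""
      · have he : pvExtractId le = none := by simp [pvExtractId, h, hl]
        simp only [he]
        show t.foldl pvInnerB (pvInnerB (acc, b) le) = _
        simp only [pvInnerB, h]
        rw [if_pos (Or.inl hl)]
        exact ih acc b
      · have he : pvExtractId le = some lid := by simp [pvExtractId, h, hl]
        by_cases hc : lid ∈ acc
        · simp only [he]
          show t.foldl pvInnerB (pvInnerB (acc, b) le) = _
          simp only [pvInnerB, h]
          rw [if_pos (Or.inr hc), ih acc b]
          simp [pvNewIds, hc]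
        · simp only [he]
          show t.foldl pvInnerB (pvInnerB (acc, b) le) = _
          simp only [pvInnerB, h]
          rw [if_neg (by simp [hl, hc]), ih (acc ++ [lid]) true]
          simp [pvNewIds, hc]

theorem mem_pvNewIds : ∀ (l c : List String) (y : String), y ∈ pvNewIds c l ↔ y ∈ l ∧ y ∉ c := by
  intro l
  induction l with
  | nil => intro c y; simp [pvNewIds]
  | cons x t ih =>
    intro c y
    by_cases hx : x ∈ c
    · simp only [pvNewIds, if_pos hx, ih]
      constructor
      · rintro ⟨hy, hyc⟩; exact ⟨List.mem_cons_of_mem _ hy, hyc⟩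
      · rintro ⟨hy, hyc⟩
        rcases List.mem_cons.mp hy with rfl | hy
        · exact absurd hx hyc
        · exact ⟨hy, hyc⟩
    · simp only [pvNewIds, if_neg hx, List.mem_cons, ih]
      constructor
      · rintro (rfl | ⟨hy, hyc⟩)
        · exact ⟨Or.inl rfl, hx⟩
        · refine ⟨Or.inr hy, fun h => hyc (List.mem_append_left _ h)⟩
      · rintro ⟨rfl | hy, hyc⟩
        · exact Or.inl rfl
        · by_cases hxy : y = x
          · exact Or.inl hxy
          · refine Or.inr ⟨hy, ?_⟩
            simp [List.mem_append, hyc, hxy]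

theorem nodup_append_pvNewIds : ∀ (l c : List String), c.Nodup → (c ++ pvNewIds c l).Nodup := by
  intro l
  induction l with
  | nil => intro c h; simpa [pvNewIds]
  | cons x t ih =>
    intro c h
    by_cases hx : x ∈ c
    · simpa [pvNewIds, if_pos hx] using ih c h
    · have h' : (c ++ [x]).Nodup := by
        simp [List.nodup_append, h]
        exact fun a ha hax => hx (hax ▸ ha)
      have hrec := ih (c ++ [x]) h'
      have heq : c ++ x :: pvNewIds (c ++ [x]) t = (c ++ [x]) ++ pvNewIds (c ++ [x]) t := by simp
      simp only [pvNewIds, if_neg hx]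
      rw [heq]
      exact hrec

theorem pvNewIds_subset (l c : List String) : ∀ y ∈ pvNewIds c l, y ∈ l :=
  fun y hy => ((mem_pvNewIds l c y).mp hy).1

-- one full sweep of the snapshot: result = acc ++ extra with the listed properties
theorem pvPassB_spec (master_cache : List (String × List (String × List (List (String × String))))) :
    ∀ (ids acc : List String) (b : Bool),
    ∃ extra : List String,
      pvPassB master_cache ids (acc, b) = (acc ++ extra, b || !extra.isEmpty) ∧
      (∀ y ∈ extra, ∃ x ∈ ids, y ∈ pvLinkIds master_cache x) ∧
      (∀ x ∈ ids, ∀ y ∈ pvLinkIds master_cache x, y ∈ acc ++ extra) ∧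
      (acc.Nodup → (acc ++ extra).Nodup) := by
  intro ids
  induction ids with
  | nil =>
    intro acc b
    exact ⟨[], by simp [pvPassB], by simp, by simp, by simpa using id⟩
  | cons cid t ih =>
    intro acc b
    have hstep : pvPassB master_cache (cid :: t) (acc, b)
        = pvPassB master_cache t ((pvLinksRaw master_cache cid).foldl pvInnerB (acc, b)) := rfl
    set n₁ := pvNewIds acc (pvLinkIds master_cache cid) with hn₁
    have hinner : (pvLinksRaw master_cache cid).foldl pvInnerB (acc, b)
        = (acc ++ n₁, b || !n₁.isEmpty) := by
      rw [pvFoldInnerB_eq, pvLinkIds_def]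
    obtain ⟨e₂, he₂, hmem₂, hcl₂, hnd₂⟩ := ih (acc ++ n₁) (b || !n₁.isEmpty)
    refine ⟨n₁ ++ e₂, ?_, ?_, ?_, ?_⟩
    · rw [hstep, hinner, he₂]
      cases n₁ <;> simp [Bool.or_assoc]
    · intro y hy
      rcases List.mem_append.mp hy with hy | hy
      · exact ⟨cid, List.mem_cons_self .., pvNewIds_subset _ _ y hy⟩
      · obtain ⟨x, hx, hyx⟩ := hmem₂ y hy
        exact ⟨x, List.mem_cons_of_mem _ hx, hyx⟩
    · intro x hx y hy
      rcases List.mem_cons.mp hx with rfl | hx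
      · by_cases hyc : y ∈ acc
        · exact List.mem_append_left _ hyc
        · have : y ∈ n₁ := (mem_pvNewIds _ _ y).mpr ⟨hy, hyc⟩
          exact List.mem_append_right _ (List.mem_append_left _ this)
      · have := hcl₂ x hx y hy
        simpa [List.append_assoc] using this
    · intro hnd
      have h₁ : (acc ++ n₁).Nodup := nodup_append_pvNewIds _ acc hnd
      have := hnd₂ h₁
      simpa [List.append_assoc] using this

-- counting how much of the candidate universe is still outside the chain
def pvRem (start_id : String) (master_cache : List (String × List (String × List (List (String × String))))) (c : List String) : Nat :=
  ((pvU start_id master_cache).filter (fun z => !c.contains z)).length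

theorem pvFilter_le {p q : String → Bool} (h : ∀ z, p z = true → q z = true) :
    ∀ l : List String, (l.filter p).length ≤ (l.filter q).length := by
  intro l
  induction l with
  | nil => simp
  | cons x t ih =>
    by_cases hp : p x = true
    · simp [List.filter_cons, hp, h x hp]; omega
    · simp only [List.filter_cons]
      rw [if_neg (by simp [hp])]
      by_cases hq : q x = true <;> simp [hq] <;> omega

theorem pvFilter_lt {p q : String → Bool} (h : ∀ z, p z = true → q z = true)
    (x : String) (hpx : p x = false) (hqx : q x = true) :
    ∀ l : List String, x ∈ l → (l.filter p).length < (l.filter q).length := by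
  intro l
  induction l with
  | nil => simp
  | cons a t ih =>
    intro hx
    rcases List.mem_cons.mp hx with rfl | hx
    · have hle := pvFilter_le h t
      simp [List.filter_cons, hpx, hqx]
      omega
    · have hlt := ih hx
      by_cases hp : p a = true
      · simp [List.filter_cons, hp, h a hp]
        omega
      · by_cases hq : q a = true
        · simp [List.filter_cons, hp, hq]
          omega
        · simp [List.filter_cons, hp, hq]
          omega

theorem pvRem_snoc_le (start_id : String) (master_cache : List (String × List (String × List (List (String × String)))))
    (c : List String) (x : String) : pvRem start_id master_cache (c ++ [x]) ≤ pvRem start_id master_cache c := by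
  apply pvFilter_le
  intro z hz
  simp only [Bool.not_eq_true'] at *
  simp only [List.contains_append] at hz
  simpa using (Bool.or_eq_false_iff.mp hz).1

theorem pvRem_snoc_lt (start_id : String) (master_cache : List (String × List (String × List (List (String × String)))))
    (c : List String) (x : String) (hx : x ∈ pvU start_id master_cache) (hc : x ∉ c) :
    pvRem start_id master_cache (c ++ [x]) < pvRem start_id master_cache c := by
  have himp : ∀ z, (fun z => !(c ++ [x]).contains z) z = true → (fun z => !c.contains z) z = true := by
    intro z hz
    simp only [Bool.not_eq_true'] at *
    simp only [List.contains_append] at hz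
    simpa using (Bool.or_eq_false_iff.mp hz).1
  have hpx : (fun z => !(c ++ [x]).contains z) x = false := by simp
  have hqx : (fun z => !c.contains z) x = true := by simpa using hc
  exact pvFilter_lt himp x hpx hqx _ hx

theorem pvRem_append (start_id : String) (master_cache : List (String × List (String × List (List (String × String))))) :
    ∀ (new c : List String), (∀ y ∈ new, y ∈ pvU start_id master_cache) → (c ++ new).Nodup →
    pvRem start_id master_cache (c ++ new) + new.length ≤ pvRem start_id master_cache c := by
  intro new
  induction new with
  | nil => intro c _ _; simp
  | cons x t ih =>
    intro c hsub hnd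
    have hxU : x ∈ pvU start_id master_cache := hsub x (List.mem_cons_self ..)
    have hxc : x ∉ c := fun hmem => (List.nodup_append.mp hnd).2.2 x hmem x (List.mem_cons_self ..) rfl
    have h1 := pvRem_snoc_lt start_id master_cache c x hxU hxc
    have heq2 : c ++ x :: t = (c ++ [x]) ++ t := by simp
    have hnd' : ((c ++ [x]) ++ t).Nodup := heq2 ▸ hnd
    have h2 := ih (c ++ [x]) (fun y hy => hsub y (List.mem_cons_of_mem _ hy)) hnd'
    rw [heq2]
    simp only [List.length_cons]
    omega

theorem pvLinkIds_nil_of_not_key (master_cache : List (String × List (String × List (List (String × String)))))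
    (c : String) (h : c ∉ master_cache.map Prod.fst) : pvLinkIds master_cache c = [] := by
  have hfind : List.find? (fun p => p.1 == c) master_cache = none := by
    rw [List.find?_eq_none]
    intro x hx
    simp only [beq_iff_eq]
    exact fun hxc => h (List.mem_map.mpr ⟨x, hx, hxc⟩)
  simp [pvLinkIds, pvLinksRaw, PySem.Dict.get?, hfind]

theorem pvLinkIds_sub_U (start_id : String) (master_cache : List (String × List (String × List (List (String × String)))))
    (c y : String) (hy : y ∈ pvLinkIds master_cache c) : y ∈ pvU start_id master_cache := by
  by_cases hk : c ∈ master_cache.map Prod.fst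
  · refine List.mem_cons_of_mem _ (List.mem_append_right _ ?_)
    exact List.mem_flatMap.mpr ⟨c, hk, hy⟩
  · rw [pvLinkIds_nil_of_not_key master_cache c hk] at hy
    cases hy

theorem pvLinkIds_length_le (master_cache : List (String × List (String × List (List (String × String)))))
    (c : String) : (pvLinkIds master_cache c).length ≤ (pvAllLinks master_cache).length := by
  by_cases hk : c ∈ master_cache.map Prod.fst
  · unfold pvAllLinks
    rw [List.length_flatMap]
    exact List.single_le_sum (by simp) _ (List.mem_map.mpr ⟨c, hk, rfl⟩)
  · simp [pvLinkIds_nil_of_not_key master_cache c hk]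

-- a reachable node either stays inside the visited chain or escapes through a pending node
theorem pvReachEscape (master_cache : List (String × List (String × List (List (String × String)))))
    (chain pend : List String)
    (hinv : ∀ y ∈ chain, y ∈ pend ∨ ∀ z ∈ pvLinkIds master_cache y, z ∈ chain ∨ z ∈ pend)
    (x y : String) (hr : pvReach master_cache y x) :
    y ∈ chain → x ∈ chain ∨ ∃ s ∈ pend, pvReach master_cache s x := by
  induction hr using Relation.ReflTransGen.head_induction_on with
  | refl => exact fun h => Or.inl h
  | @head a b h' hrest ih =>
    intro ha
    rcases hinv a ha with hp | hcl
    · exact Or.inr ⟨a, hp, Relation.ReflTransGen.head h' hrest⟩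
    · rcases hcl b h' with hb | hb
      · exact ih hb
      · exact Or.inr ⟨b, hb, hrest⟩

-- reachability never leaves a link-closed set
theorem pvReachClosed (master_cache : List (String × List (String × List (List (String × String)))))
    (c : List String) (hcl : ∀ x ∈ c, ∀ y ∈ pvLinkIds master_cache x, y ∈ c)
    (s x : String) (hr : pvReach master_cache s x) : s ∈ c → x ∈ c := by
  induction hr using Relation.ReflTransGen.head_induction_on with
  | refl => exact id
  | @head a b h' _ ih => exact fun ha => ih (hcl a ha b h')

-- BFS characterization: given the closedness invariant and enough fuel, the final chain is
-- exactly chain ∪ { x reachable from some queue element }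
theorem pvBfsA_main (start_id : String) (master_cache : List (String × List (String × List (List (String × String))))) :
    ∀ (f : Nat) (queue chain : List String),
    queue.length + ((pvAllLinks master_cache).length + 1) * pvRem start_id master_cache chain + 1 ≤ f →
    (∀ x ∈ chain, ∀ y ∈ pvLinkIds master_cache x, y ∈ chain ∨ y ∈ queue) →
    chain.Nodup →
    (pvBfsA master_cache f queue chain).Nodup ∧
      ∀ x, x ∈ pvBfsA master_cache f queue chain ↔ x ∈ chain ∨ ∃ s ∈ queue, pvReach master_cache s x := by
  intro f
  induction f with
  | zero => intro q c hf _ _; omega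
  | succ f ih =>
    intro q c hf hinv hnd
    match q with
    | [] =>
      refine ⟨by simpa [pvBfsA] using hnd, fun x => ?_⟩
      simp [pvBfsA]
    | current :: rest =>
      by_cases hc : current ∈ c
      · have hcc : c.contains current = true := by simpa using hc
        simp only [pvBfsA, hcc, if_true]
        have hinv' : ∀ x ∈ c, ∀ y ∈ pvLinkIds master_cache x, y ∈ c ∨ y ∈ rest := by
          intro x hx y hy
          rcases hinv x hx y hy with h | h
          · exact Or.inl h
          · rcases List.mem_cons.mp h with rfl | h
            · exact Or.inl hc
            · exact Or.inr h
        obtain ⟨hnd', hmem⟩ := ih rest c (by simp at hf ⊢; omega) hinv' hnd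
        refine ⟨hnd', fun x => ?_⟩
        rw [hmem x]
        constructor
        · rintro (h | ⟨s, hs, hr⟩)
          · exact Or.inl h
          · exact Or.inr ⟨s, List.mem_cons_of_mem _ hs, hr⟩
        · rintro (h | ⟨s, hs, hr⟩)
          · exact Or.inl h
          · rcases List.mem_cons.mp hs with rfl | hs
            · exact pvReachEscape master_cache c rest
                (fun y hy => Or.inr (fun z hz => hinv' y hy z hz)) x s hr hc
            · exact Or.inr ⟨s, hs, hr⟩
      · have hcc : c.contains current = false := by simpa using hc
        have hadd : PySem.Set.add c current = c ++ [current] := by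
          simp [PySem.Set.add, PySem.Set.contains, hc]
        simp only [pvBfsA, hcc, Bool.false_eq_true, if_false, hadd,
          pvFoldA_eq master_cache _ rest, pvLinkIds_def]
        have hlen : (pvLinkIds master_cache current).length ≤ (pvAllLinks master_cache).length :=
          pvLinkIds_length_le master_cache current
        have hfuel : (rest ++ pvLinkIds master_cache current).length +
            ((pvAllLinks master_cache).length + 1) * pvRem start_id master_cache (c ++ [current]) + 1 ≤ f := by
          by_cases hU : current ∈ pvU start_id master_cache
          · have := pvRem_snoc_lt start_id master_cache c current hU hc
            simp only [List.length_append] at *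
            have hmul : ((pvAllLinks master_cache).length + 1) * (pvRem start_id master_cache (c ++ [current]) + 1) ≤
                ((pvAllLinks master_cache).length + 1) * pvRem start_id master_cache c := Nat.mul_le_mul_left _ (by omega)
            rw [Nat.mul_add, Nat.mul_one] at hmul
            simp only [List.length_cons] at hf
            omega
          · have hnk : current ∉ master_cache.map Prod.fst := by
              intro h
              exact hU (List.mem_cons_of_mem _ (List.mem_append_left _ h))
            rw [pvLinkIds_nil_of_not_key master_cache current hnk]
            have hrle := pvRem_snoc_le start_id master_cache c current
            simp only [List.length_append, List.length_nil, List.length_cons] at *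
            have hmul : ((pvAllLinks master_cache).length + 1) * pvRem start_id master_cache (c ++ [current]) ≤
                ((pvAllLinks master_cache).length + 1) * pvRem start_id master_cache c := Nat.mul_le_mul_left _ hrle
            omega
        have hinv' : ∀ x ∈ c ++ [current], ∀ y ∈ pvLinkIds master_cache x,
            y ∈ c ++ [current] ∨ y ∈ rest ++ pvLinkIds master_cache current := by
          intro x hx y hy
          rcases List.mem_append.mp hx with hx | hx
          · rcases hinv x hx y hy with h | h
            · exact Or.inl (List.mem_append_left _ h)
            · rcases List.mem_cons.mp h with rfl | h
              · exact Or.inl (List.mem_append_right _ (List.mem_singleton_self _))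
              · exact Or.inr (List.mem_append_left _ h)
          · rcases List.mem_singleton.mp hx with rfl
            exact Or.inr (List.mem_append_right _ hy)
        have hnd' : (c ++ [current]).Nodup := by
          simp [List.nodup_append, hnd]
          exact fun a ha hax => hc (hax ▸ ha)
        obtain ⟨hndr, hmem⟩ := ih (rest ++ pvLinkIds master_cache current) (c ++ [current]) hfuel hinv' hnd'
        refine ⟨hndr, fun x => ?_⟩
        rw [hmem x]
        constructor
        · rintro (h | ⟨s, hs, hr⟩)
          · rcases List.mem_append.mp h with h | h
            · exact Or.inl h
            · rcases List.mem_singleton.mp h with rfl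
              exact Or.inr ⟨x, List.mem_cons_self .., Relation.ReflTransGen.refl⟩
          · rcases List.mem_append.mp hs with hs | hs
            · exact Or.inr ⟨s, List.mem_cons_of_mem _ hs, hr⟩
            · exact Or.inr ⟨current, List.mem_cons_self .., Relation.ReflTransGen.head hs hr⟩
        · rintro (h | ⟨s, hs, hr⟩)
          · exact Or.inl (List.mem_append_left _ h)
          · rcases List.mem_cons.mp hs with rfl | hs
            · rcases Relation.ReflTransGen.cases_head hr with rfl | ⟨z, hz, hrz⟩
              · exact Or.inl (List.mem_append_right _ (List.mem_singleton_self _))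
              · exact Or.inr ⟨z, List.mem_append_right _ hz, hrz⟩
            · exact Or.inr ⟨s, List.mem_append_left _ hs, hr⟩

-- saturation characterization: with enough fuel the fixed point is exactly the set of ids
-- reachable from the initial chain
theorem pvSatB_main (start_id : String) (master_cache : List (String × List (String × List (List (String × String))))) :
    ∀ (f : Nat) (c : List String),
    pvRem start_id master_cache c + 1 ≤ f →
    c.Nodup →
    (∀ y ∈ c, y ∈ pvU start_id master_cache) →
    (pvSatB master_cache f c).Nodup ∧
      ∀ x, x ∈ pvSatB master_cache f c ↔ ∃ s ∈ c, pvReach master_cache s x := by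
  intro f
  induction f with
  | zero => intro c hf _ _; omega
  | succ f ih =>
    intro c hf hnd hU
    obtain ⟨extra, hpass, hmem, hcl, hndp⟩ := pvPassB_spec master_cache c c false
    simp only [pvSatB, hpass]
    by_cases hemp : extra.isEmpty
    · have hext : extra = [] := List.isEmpty_iff.mp hemp
      subst hext
      simp only [List.isEmpty_nil, Bool.not_true, Bool.or_false, Bool.false_eq_true, if_false,
        List.append_nil]
      have hclosed : ∀ x ∈ c, ∀ y ∈ pvLinkIds master_cache x, y ∈ c := by
        intro x hx y hy
        simpa using hcl x hx y hy
      refine ⟨hnd, fun x => ⟨fun hx => ⟨x, hx, Relation.ReflTransGen.refl⟩, ?_⟩⟩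
      rintro ⟨s, hs, hr⟩
      exact pvReachClosed master_cache c hclosed s x hr hs
    · have hne : extra.isEmpty = false := by simpa using hemp
      simp only [hne, Bool.not_false, Bool.or_true, if_true]
      have hextU : ∀ y ∈ extra, y ∈ pvU start_id master_cache := by
        intro y hy
        obtain ⟨x, _, hyx⟩ := hmem y hy
        exact pvLinkIds_sub_U start_id master_cache x y hyx
      have hnd' : (c ++ extra).Nodup := hndp hnd
      have hU' : ∀ y ∈ c ++ extra, y ∈ pvU start_id master_cache := by
        intro y hy
        rcases List.mem_append.mp hy with hy | hy
        · exact hU y hy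
        · exact hextU y hy
      have hflen : pvRem start_id master_cache (c ++ extra) + 1 ≤ f := by
        have h1 := pvRem_append start_id master_cache extra c hextU hnd'
        have h2 : 1 ≤ extra.length := List.length_pos_of_ne_nil (by
          intro hh; rw [hh] at hne; simp at hne)
        omega
      obtain ⟨hndr, hmemr⟩ := ih (c ++ extra) hflen hnd' hU'
      refine ⟨hndr, fun x => ?_⟩
      rw [hmemr x]
      constructor
      · rintro ⟨s, hs, hr⟩
        rcases List.mem_append.mp hs with hs | hs
        · exact ⟨s, hs, hr⟩
        · obtain ⟨x', hx', hsx'⟩ := hmem s hs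
          exact ⟨x', hx', Relation.ReflTransGen.head hsx' hr⟩
      · rintro ⟨s, hs, hr⟩
        exact ⟨s, List.mem_append_left _ hs, hr⟩

theorem pvRem_nil (start_id : String) (master_cache : List (String × List (String × List (List (String × String))))) :
    pvRem start_id master_cache [] = (pvU start_id master_cache).length := by
  simp [pvRem]

-- ===== VERDICT (by name: the statement is the Claim_ definition above) =====
theorem get_full_event_chain_ids_spec : Claim_equal_get_full_event_chain_ids := by
  unfold Claim_equal_get_full_event_chain_ids
  intro start_id master_cache _hdom
  unfold Spec_get_full_event_chain_ids get_full_event_chain_ids get_full_event_chain_ids_alt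
  by_cases h : (PySem.Dict.mk master_cache).contains start_id = false
  · simp [h]
  · have h' : (PySem.Dict.mk master_cache).contains start_id = true := by simpa using h
    have hne : ¬((true : Bool) = false) := by decide
    rw [h', if_neg hne, if_neg hne]
    have hrem1 : pvRem start_id master_cache [start_id] ≤ (pvU start_id master_cache).length :=
      List.length_filter_le _ _
    have hfa : (1 : Nat) + ((pvAllLinks master_cache).length + 1) * pvRem start_id master_cache [] + 1 ≤ pvFuel start_id master_cache := by
      rw [pvRem_nil]
      unfold pvFuel
      omega
    have hfb : pvRem start_id master_cache [start_id] + 1 ≤ pvFuelB start_id master_cache := by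
      unfold pvFuelB
      omega
    obtain ⟨hndA, hmemA⟩ := pvBfsA_main start_id master_cache (pvFuel start_id master_cache) [start_id] []
      (by simpa using hfa) (by simp) (by simp)
    obtain ⟨hndB, hmemB⟩ := pvSatB_main start_id master_cache (pvFuelB start_id master_cache) [start_id]
      hfb (by simp) (by intro y hy; rcases List.mem_singleton.mp hy with rfl; exact List.mem_cons_self ..)
    rw [PySem.List.sorted_id_eq_sorted_id_iff_perm]
    rw [List.perm_ext_iff_of_nodup hndA hndB]
    intro a
    rw [hmemA a, hmemB a]
    constructor
    · rintro (h | ⟨s, hs, hr⟩)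
      · cases h
      · rcases List.mem_singleton.mp hs with rfl
        exact ⟨s, List.mem_singleton_self _, hr⟩
    · rintro ⟨s, hs, hr⟩
      exact Or.inr ⟨s, hs, hr⟩
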